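-- pv_equiv track=rewrite | github.com/tnakaicode/jburkardt-python | knapsack_brute/knapsack_brute.py | subset_next
-- ===== SOURCE A (Python) =====
-- def subset_next ( s ):
--
-- #*****************************************************************************80
-- #
-- ## subset_next() returns the next subset of n items.
-- #
-- #  Discussion:
-- #
-- #    The subset is represented as a vector of binary digits.
-- #    The subsets are listed in numerical order.
-- #    After the last subset is returned, the sequence begins again at 0.
-- #
-- #  Example:
-- #
-- #    [ 0, 0, 0 ]
-- #    [ 0, 0, 1 ]
-- #    [ 0, 1, 0 ]
-- #    [ 0, 1, 1 ]
-- #    [ 1, 0, 0 ]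
-- #    [ 1, 0, 1 ]
-- #    [ 1, 1, 0 ]
-- #    [ 1, 1, 1 ]
-- #
-- #  Licensing:
-- #
-- #    This code is distributed under the MIT license.
-- #
-- #  Modified:
-- #
-- #    18 November 2024
-- #
-- #  Author:
-- #
-- #    John Burkardt
-- #
-- #  Input:
-- #
-- #    integer s[n]: the current subset.
-- #
-- #  Output:
-- #
-- #    integer s[n]: the next subset.
-- #
--   n = len ( s )
-- #
-- #  Starting at the last index, add 1, and if necessary, carry to the left.
-- #
--   for i in range ( n - 1, -1, -1 ):
--     if ( s[i] == 0 ):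
--       s[i] = 1
--       break
--     else:
--       s[i] = 0
--
--   return s
-- ===== SOURCE B (Python) =====
-- def subset_next(s):
--     # One forward pass: track the length of the run of consecutive nonzero
--     # entries ending at the current position; at the end it is the length of
--     # the trailing nonzero suffix (the carry span).  Then rebuild the list.
--     n = len(s)
--     run = 0
--     for x in s:
--         run = 0 if x == 0 else run + 1
--     if run == n:
--         out = [0] * n
--     else:
--         out = s[:n - run - 1] + [1] + [0] * run
--     s[:] = out
--     return s
-- ===== Notes on version B (the rewrite author's own statement) =====
-- stated objective: alternative
-- what changed: A carries right-to-left, flipping entries in place until it can write a one and break; B instead makes one left-to-right pass with an accumulator that measures the run of consecutive nonzero entries (at the end, the trailing nonzero carry span) and then rebuilds the whole list in one construction: unchanged prefix, a single one, then that many zeros, or all zeros when the run covers the list. Equivalence is about the returned value; both Pythons mutate the argument list in place and return it.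
import Mathlib
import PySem

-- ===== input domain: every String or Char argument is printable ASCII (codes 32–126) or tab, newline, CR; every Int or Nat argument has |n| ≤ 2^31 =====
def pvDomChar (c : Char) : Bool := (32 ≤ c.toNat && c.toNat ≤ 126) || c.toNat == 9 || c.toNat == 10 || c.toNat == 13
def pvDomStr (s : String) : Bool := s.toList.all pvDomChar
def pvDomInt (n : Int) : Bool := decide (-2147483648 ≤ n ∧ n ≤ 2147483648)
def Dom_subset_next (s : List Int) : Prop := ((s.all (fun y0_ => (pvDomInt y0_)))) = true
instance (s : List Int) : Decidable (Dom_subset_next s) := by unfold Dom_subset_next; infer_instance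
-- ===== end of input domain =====

-- B replaces A's right-to-left flip-and-carry loop by a forward accumulator pass (trailing-nonzero
-- run length) plus a one-shot rebuild; equivalence is about the returned value (both Pythons mutate
-- the argument list in place and return it).

-- ===== PORT A =====
-- A walks indices n-1 … 0; while s[i] ≠ 0 it writes 0, at the first s[i] == 0 it writes 1 and breaks.
-- Transliterated as structural recursion over the reversed list (same traversal order, recursion stops = break).
def subsetCarry : List Int → List Int
  | [] => []
  | x :: r => if x == 0 then 1 :: r else 0 :: subsetCarry r

def subset_next (s : List Int) : List Int := (subsetCarry s.reverse).reverse

-- ===== PORT B =====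
-- Source B: forward fold computing run = length of the run of consecutive nonzero entries ending at the
-- current element (runCount); then one rebuild: all zeros if run == n, else prefix ++ [1] ++ zeros(run).
def runCount (s : List Int) : Nat := s.foldl (fun r x => if x == 0 then 0 else r + 1) 0

def subset_next_alt (s : List Int) : List Int :=
  if runCount s == s.length then List.replicate s.length 0
  else s.take (s.length - runCount s - 1) ++ [1] ++ List.replicate (runCount s) 0

-- ===== PRECONDITION & SPEC =====
def Spec_subset_next (s : List Int) (out : List Int) : Prop := out = subset_next_alt s
instance (s : List Int) (out : List Int) : Decidable (Spec_subset_next s out) := by unfold Spec_subset_next; infer_instance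

-- ===== CLAIM (what is proved, stated in full; the proofs are below) =====
def Claim_equal_subset_next : Prop := ∀ (s : List Int), Dom_subset_next s → Spec_subset_next s (subset_next s)

-- ===== LEMMAS AND PROOFS =====

lemma subset_next_snoc (r : List Int) (x : Int) :
    subset_next (r ++ [x]) = if x == 0 then r ++ [1] else subset_next r ++ [0] := by
  by_cases hx : x == 0 <;> simp [subset_next, subsetCarry, hx]

lemma runCount_snoc (r : List Int) (x : Int) :
    runCount (r ++ [x]) = if x == 0 then 0 else runCount r + 1 := by
  cases hx : (x == 0) with
  | true =>
    have hx' : x = 0 := by simpa using hx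
    simp [runCount, List.foldl_append, hx']
  | false =>
    have hx' : ¬ x = 0 := by simpa using hx
    simp [runCount, List.foldl_append, hx']

lemma run_le_length (s : List Int) : runCount s ≤ s.length := by
  induction s using List.reverseRecOn with
  | nil => simp [runCount]
  | append_singleton r x ih =>
    rw [runCount_snoc]
    by_cases hx : x == 0 <;> simp [hx] <;> omega

lemma subset_next_alt_snoc (r : List Int) (x : Int) :
    subset_next_alt (r ++ [x]) = if x == 0 then r ++ [1] else subset_next_alt r ++ [0] := by
  have hle := run_le_length r
  cases hx : (x == 0) with
  | true =>
    have h0 : runCount (r ++ [x]) = 0 := by rw [runCount_snoc, hx]; simp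
    simp only [subset_next_alt, h0, List.length_append, List.length_cons, List.length_nil,
      if_true]
    rw [if_neg (by simp)]
    have e1 : r.length + (0 + 1) - 0 - 1 = r.length := by omega
    rw [e1, List.replicate_zero, List.take_append_of_le_length (le_refl _), List.take_length]
    simp
  | false =>
    have h1 : runCount (r ++ [x]) = runCount r + 1 := by rw [runCount_snoc, hx]; simp
    simp only [subset_next_alt, h1, Bool.false_eq_true, if_false, List.length_append,
      List.length_cons, List.length_nil]
    by_cases h : runCount r = r.length
    · rw [if_pos (by simp [h]), if_pos (by simp [h])]
      simp [List.replicate_succ']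
    · have hlt : runCount r < r.length := lt_of_le_of_ne hle h
      rw [if_neg (by simp; omega), if_neg (by simp [h])]
      have e1 : r.length + (0 + 1) - (runCount r + 1) - 1 = r.length - runCount r - 1 := by omega
      rw [e1, List.take_append_of_le_length (by omega)]
      simp [List.replicate_succ']

lemma subset_next_eq (s : List Int) : subset_next s = subset_next_alt s := by
  induction s using List.reverseRecOn with
  | nil => rfl
  | append_singleton r x ih =>
    rw [subset_next_snoc, subset_next_alt_snoc, ih]

-- ===== VERDICT (by name: the statement is the Claim_ definition above) =====
theorem subset_next_spec : Claim_equal_subset_next := fun s _ => subset_next_eq s
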